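-- pv_equiv track=rewrite | github.com/ddururiiiiiii/codingTest_python | .idea/codingTest_beginning/day14.py | solution
-- ===== SOURCE A (Python) =====
-- def solution(num_list):
--     answer = 0
--     odd = 0
--     even = 0
--
--     for i, v in enumerate(num_list):
--         if i % 2 == 0:
--             even += num_list[i];
--         else :
--             odd += num_list[i];
--
--     if even > odd :
--         return even
--     else :
--         return odd
--
--     return answer
-- ===== SOURCE B (Python) =====
-- def solution(num_list):
--     # Backward pass with a role-swapping accumulator: prepending an element
--     # flips the parity of everything after it, so at each step the two sums
--     # swap roles and the new element joins the even-position sum.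
--     even = 0
--     odd = 0
--     for v in reversed(num_list):
--         even, odd = v + odd, even
--     return even if even > odd else odd
-- ===== Notes on version B (the rewrite author's own statement) =====
-- stated objective: alternative
-- what changed: Replaced the forward enumerate loop with parity branching and num_list[i] indexing by an index-free backward pass whose accumulator pair (even, odd) swaps roles at each element (prepending flips every parity), so the loop has no indices and no conditional.
import Mathlib
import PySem

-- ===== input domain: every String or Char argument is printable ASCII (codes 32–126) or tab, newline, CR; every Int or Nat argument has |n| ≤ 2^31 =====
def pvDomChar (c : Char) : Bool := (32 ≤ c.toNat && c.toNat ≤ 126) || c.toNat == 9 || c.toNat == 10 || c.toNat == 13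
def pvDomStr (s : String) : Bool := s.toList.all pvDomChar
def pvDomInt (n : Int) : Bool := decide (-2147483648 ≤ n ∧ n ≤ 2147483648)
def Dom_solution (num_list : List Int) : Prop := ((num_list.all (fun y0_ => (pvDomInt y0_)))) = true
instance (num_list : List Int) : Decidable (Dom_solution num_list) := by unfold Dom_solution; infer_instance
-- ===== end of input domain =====

-- B replaces A's forward index-parity loop by an index-free backward pass with a role-swapping (even, odd) accumulator; same cost, different decomposition.


-- ===== PORT A =====
-- for i, v in enumerate(num_list): if i % 2 == 0: even += num_list[i] else: odd += num_list[i]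
-- (num_list[i] ported as pyGetD with default 0; i from enumerate is always a valid index, so this is exact)
def solution (num_list : List Int) : Int :=
  let st := (PySem.List.enumerate num_list 0).foldl
    (fun (st : Int × Int) p =>
      if PySem.Int.mod p.1 2 = 0 then (st.1 + PySem.List.pyGetD num_list p.1 0, st.2)
      else (st.1, st.2 + PySem.List.pyGetD num_list p.1 0)) (0, 0)
  if st.1 > st.2 then st.1 else st.2

-- ===== PORT B =====
-- even = odd = 0; for v in reversed(num_list): even, odd = v + odd, even; return even if even > odd else odd
def solution_alt (num_list : List Int) : Int :=
  let st := num_list.reverse.foldl (fun (st : Int × Int) v => (v + st.2, st.1)) (0, 0)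
  if st.1 > st.2 then st.1 else st.2

-- ===== PRECONDITION & SPEC =====
def Spec_solution (num_list : List Int) (out : Int) : Prop := out = solution_alt num_list
instance (num_list : List Int) (out : Int) : Decidable (Spec_solution num_list out) := by unfold Spec_solution; infer_instance

-- ===== CLAIM (what is proved, stated in full; the proofs are below) =====
def Claim_equal_solution : Prop := ∀ (num_list : List Int), Dom_solution num_list → Spec_solution num_list (solution num_list)

-- ===== LEMMAS AND PROOFS =====

-- the even-indexed / odd-indexed elements of a list (proof helpers only)
def pvEvens : List Int → List Int
  | [] => []
  | [x] => [x]
  | x :: _ :: t => x :: pvEvens t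

def pvOdds : List Int → List Int
  | [] => []
  | [_] => []
  | _ :: y :: t => y :: pvOdds t

theorem pvEvens_cons (x : Int) (t : List Int) : pvEvens (x :: t) = x :: pvOdds t := by
  cases t with
  | nil => simp [pvEvens, pvOdds]
  | cons y u =>
      cases u with
      | nil => simp [pvEvens, pvOdds]
      | cons z w =>
          simp only [pvEvens, pvOdds]
          rw [pvEvens_cons]

theorem pvOdds_cons (x : Int) (t : List Int) : pvOdds (x :: t) = pvEvens t := by
  cases t with
  | nil => simp [pvEvens, pvOdds]
  | cons y u =>
      cases u with
      | nil => simp [pvEvens, pvOdds]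
      | cons z w =>
          simp only [pvOdds, pvEvens]
          rw [pvOdds_cons]

-- A's loop computes exactly (sum of even-indexed, sum of odd-indexed)
theorem pv_foldA (xs : List Int) (m : Nat) (e o : Int) :
    (PySem.List.enumerate xs (2 * (m : Int))).foldl
      (fun (st : Int × Int) p =>
        if PySem.Int.mod p.1 2 = 0 then (st.1 + p.2, st.2)
        else (st.1, st.2 + p.2)) (e, o)
      = (e + (pvEvens xs).sum, o + (pvOdds xs).sum) := by
  induction xs using pvEvens.induct generalizing m e o with
  | case1 => simp [PySem.List.enumerate, pvEvens, pvOdds]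
  | case2 x =>
      simp [PySem.List.enumerate_cons, PySem.List.enumerate_nil, pvEvens, pvOdds,
        PySem.Int.mod, Int.fmod_eq_emod]
  | case3 x y t ih =>
      have h2 : (2 * (m:Int)) + 1 + 1 = 2 * ((m+1 : Nat) : Int) := by push_cast; ring
      simp only [PySem.List.enumerate_cons, List.foldl_cons]
      rw [h2]
      have he : PySem.Int.mod (2*(m:Int)) 2 = 0 := by
        simp [PySem.Int.mod, Int.fmod_eq_emod]
      have ho : ¬ PySem.Int.mod (2*(m:Int)+1) 2 = 0 := by
        simp [PySem.Int.mod, Int.fmod_eq_emod]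
      simp only [he, ho, if_true, if_false]
      rw [ih]
      simp [pvEvens, pvOdds]
      constructor <;> ring

-- B's backward role-swapping pass computes the same pair
theorem pv_foldB (xs : List Int) :
    xs.reverse.foldl (fun (st : Int × Int) v => (v + st.2, st.1)) (0, 0)
      = ((pvEvens xs).sum, (pvOdds xs).sum) := by
  rw [List.foldl_reverse]
  induction xs with
  | nil => simp [pvEvens, pvOdds]
  | cons x t ih =>
      simp only [List.foldr_cons, ih, pvEvens_cons, pvOdds_cons, List.sum_cons]

theorem pv_final (xs : List Int) : solution xs = solution_alt xs := by
  unfold solution solution_alt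
  have hc : (PySem.List.enumerate xs 0).foldl
      (fun (st : Int × Int) p =>
        if PySem.Int.mod p.1 2 = 0 then (st.1 + PySem.List.pyGetD xs p.1 0, st.2)
        else (st.1, st.2 + PySem.List.pyGetD xs p.1 0)) (0, 0)
      = (PySem.List.enumerate xs 0).foldl
      (fun (st : Int × Int) p =>
        if PySem.Int.mod p.1 2 = 0 then (st.1 + p.2, st.2)
        else (st.1, st.2 + p.2)) (0, 0) := by
    apply PySem.List.foldl_congr_mem
    intro a p hp
    rcases (PySem.List.mem_enumerate_iff _ _ _).1 hp with ⟨k, hk, rfl⟩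
    simp [PySem.List.pyGetD_natCast, List.getD_eq_getElem?_getD, hk]
  have h0 : (PySem.List.enumerate xs 0).foldl
      (fun (st : Int × Int) p =>
        if PySem.Int.mod p.1 2 = 0 then (st.1 + p.2, st.2)
        else (st.1, st.2 + p.2)) (0, 0) = ((pvEvens xs).sum, (pvOdds xs).sum) := by
    have h := pv_foldA xs 0 0 0
    simpa using h
  rw [hc, h0, pv_foldB]

-- ===== VERDICT (by name: the statement is the Claim_ definition above) =====
theorem solution_spec : Claim_equal_solution := by
  intro xs _
  unfold Spec_solution
  exact pv_final xs
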